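-- pv_equiv track=rewrite | github.com/bjrnwnklr/Algorithms | BFS/bfs_example.py | BFS
-- ===== SOURCE A (Python) =====
-- from collections import defaultdict, deque
--
-- n_coords = [(0, -1), (1, 0), (0, 1), (-1, 0)] # coordinates of neighbours
--
-- def BFS(grid, start):
--     q = deque([(start, [])])
--     seen = set()
--     path = defaultdict(list)
--     while q:
--         v1, p = q.pop() # removes element from the right side of the queue
--         if v1 not in seen:
--             seen.add(v1)
--
--             # find all valid neighbours
--             for n in n_coords:
--                 v_next = (v1[0] + n[0], v1[1] + n[1])
--                 if (v_next in grid
--                     and v_next not in seen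
--                     and v_next not in path
--                     and grid[v_next] != 1):
--                     # push into queue - on the left side
--                     # set the path to this new square
--                     next_path = p + [v_next]
--                     path[v_next] = next_path
--                     q.appendleft((v_next, next_path))
--
--     # once q is empty, return the dictionary with paths
--     return path
-- ===== SOURCE B (Python) =====
-- from collections import defaultdict, deque
--
-- n_coords = [(0, -1), (1, 0), (0, 1), (-1, 0)]  # coordinates of neighbours
--
-- def BFS(grid, start):
--     # Same FIFO traversal, but store only one parent pointer per discovered
--     # cell instead of a full path per queue entry; paths are rebuilt afterwards.
--     q = deque([start])
--     seen = set()
--     parent = {}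
--     while q:
--         v = q.pop()
--         if v not in seen:
--             seen.add(v)
--             for n in n_coords:
--                 w = (v[0] + n[0], v[1] + n[1])
--                 if w in grid and w not in seen and w not in parent and grid[w] != 1:
--                     parent[w] = v
--                     q.appendleft(w)
--     # rebuild each path from the parent pointers, in discovery order
--     paths = defaultdict(list)
--     for w, v in parent.items():
--         paths[w] = paths.get(v, []) + [w]
--     return paths
-- ===== Notes on version B (the rewrite author's own statement) =====
-- stated objective: alternative
-- what changed: Queue entries carry only the cell (not a copy of its whole path) and a parent-pointer dict replaces the per-cell path dict during traversal; all paths are reconstructed afterwards in one pass over the parent map in discovery order, avoiding the O(path-length) list copy per discovered cell.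
import Mathlib
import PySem

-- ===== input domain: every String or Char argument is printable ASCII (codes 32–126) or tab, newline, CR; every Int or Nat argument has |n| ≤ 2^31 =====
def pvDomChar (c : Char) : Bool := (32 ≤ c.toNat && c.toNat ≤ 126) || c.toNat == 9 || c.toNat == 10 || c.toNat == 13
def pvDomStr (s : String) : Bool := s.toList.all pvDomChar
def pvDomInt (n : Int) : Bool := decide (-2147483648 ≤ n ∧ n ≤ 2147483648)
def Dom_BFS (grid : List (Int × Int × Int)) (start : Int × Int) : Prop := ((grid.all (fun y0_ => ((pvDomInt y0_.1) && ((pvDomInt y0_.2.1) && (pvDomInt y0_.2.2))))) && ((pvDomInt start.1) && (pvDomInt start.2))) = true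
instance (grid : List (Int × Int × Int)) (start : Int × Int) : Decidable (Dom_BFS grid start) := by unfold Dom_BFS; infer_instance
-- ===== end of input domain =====

-- B replaces the per-queue-entry path copies of A by a parent-pointer dict and
-- rebuilds all paths in one pass after the traversal (same FIFO order).

-- ===== PORT A =====
-- the grid dict[(int,int),int], encoded as an assoc list of triples, as a PySem.Dict (type bridge, shared by both ports)
def gridDict (grid : List (Int × Int × Int)) : PySem.Dict (Int × Int) Int :=
  PySem.Dict.ofList (grid.map (fun t => ((t.1, t.2.1), t.2.2)))

def nCoords : List (Int × Int) := [(0, -1), (1, 0), (0, 1), (-1, 0)]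

-- body of A's 'for n in n_coords' loop; state = (queue, path).
-- 'grid[v_next] != 1' is ported as getD with default 0: exact, because it is
-- evaluated only under the guard 'g.contains w'.
def innerA (g : PySem.Dict (Int × Int) Int) (seen : PySem.Set (Int × Int)) (v : Int × Int)
    (p : List (Int × Int))
    (s : List ((Int × Int) × List (Int × Int)) × PySem.Dict (Int × Int) (List (Int × Int)))
    (n : Int × Int) :
    List ((Int × Int) × List (Int × Int)) × PySem.Dict (Int × Int) (List (Int × Int)) :=
  let w : Int × Int := (v.1 + n.1, v.2 + n.2)
  if g.contains w && !(PySem.Set.contains seen w) && !(s.2.contains w) && !(g.getD w 0 == 1)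
  then (s.1 ++ [(w, p ++ [w])], s.2.insert w (p ++ [w]))
  else s

-- A's while loop; the deque is a list whose HEAD is the right end (q.pop() = head,
-- q.appendleft = append at the tail).  Fuel grid.length+1 bounds the number of pops
-- (each pop beyond the first corresponds to a distinct key inserted into path ⊆ grid keys).
def bfsLoopA (g : PySem.Dict (Int × Int) Int) :
    Nat → List ((Int × Int) × List (Int × Int)) → PySem.Set (Int × Int) →
    PySem.Dict (Int × Int) (List (Int × Int)) → PySem.Dict (Int × Int) (List (Int × Int))
  | 0, _, _, path => path
  | _ + 1, [], _, path => path
  | f + 1, (v, p) :: q, seen, path =>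
    if PySem.Set.contains seen v then bfsLoopA g f q seen path
    else
      let seen' := PySem.Set.add seen v
      let s := nCoords.foldl (innerA g seen' v p) (q, path)
      bfsLoopA g f s.1 seen' s.2

def BFS (grid : List (Int × Int × Int)) (start : Int × Int) : List (Int × Int × List (Int × Int)) :=
  let g := gridDict grid
  (bfsLoopA g (grid.length + 1) [(start, [])] PySem.Set.empty PySem.Dict.empty).items.map
    (fun kv => (kv.1.1, kv.1.2, kv.2))

-- ===== PORT B =====
-- body of B's neighbour loop; state = (queue of cells, parent dict).
def innerB (g : PySem.Dict (Int × Int) Int) (seen : PySem.Set (Int × Int)) (v : Int × Int)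
    (s : List (Int × Int) × PySem.Dict (Int × Int) (Int × Int)) (n : Int × Int) :
    List (Int × Int) × PySem.Dict (Int × Int) (Int × Int) :=
  let w : Int × Int := (v.1 + n.1, v.2 + n.2)
  if g.contains w && !(PySem.Set.contains seen w) && !(s.2.contains w) && !(g.getD w 0 == 1)
  then (s.1 ++ [w], s.2.insert w v)
  else s

def bfsLoopB (g : PySem.Dict (Int × Int) Int) :
    Nat → List (Int × Int) → PySem.Set (Int × Int) →
    PySem.Dict (Int × Int) (Int × Int) → PySem.Dict (Int × Int) (Int × Int)
  | 0, _, _, parent => parent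
  | _ + 1, [], _, parent => parent
  | f + 1, v :: q, seen, parent =>
    if PySem.Set.contains seen v then bfsLoopB g f q seen parent
    else
      let seen' := PySem.Set.add seen v
      let s := nCoords.foldl (innerB g seen' v) (q, parent)
      bfsLoopB g f s.1 seen' s.2

-- B's reconstruction pass: 'for w, v in parent.items(): paths[w] = paths.get(v, []) + [w]'
def buildPaths (parent : PySem.Dict (Int × Int) (Int × Int)) :
    PySem.Dict (Int × Int) (List (Int × Int)) :=
  parent.items.foldl (fun paths wv => paths.insert wv.1 (paths.getD wv.2 [] ++ [wv.1]))
    PySem.Dict.empty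

def BFS_alt (grid : List (Int × Int × Int)) (start : Int × Int) : List (Int × Int × List (Int × Int)) :=
  let g := gridDict grid
  (buildPaths (bfsLoopB g (grid.length + 1) [start] PySem.Set.empty PySem.Dict.empty)).items.map
    (fun kv => (kv.1.1, kv.1.2, kv.2))

-- ===== PRECONDITION & SPEC =====
def Spec_BFS (grid : List (Int × Int × Int)) (start : Int × Int) (out : List (Int × Int × List (Int × Int))) : Prop := out = BFS_alt grid start
instance (grid : List (Int × Int × Int)) (start : Int × Int) (out : List (Int × Int × List (Int × Int))) : Decidable (Spec_BFS grid start out) := by unfold Spec_BFS; infer_instance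

-- ===== CLAIM (what is proved, stated in full; the proofs are below) =====
def Claim_equal_BFS : Prop := ∀ (grid : List (Int × Int × Int)) (start : Int × Int), Dom_BFS grid start → Spec_BFS grid start (BFS grid start)

-- ===== LEMMAS AND PROOFS =====

theorem keys_buildPaths (P : PySem.Dict (Int × Int) (Int × Int)) :
    (buildPaths P).keys = PySem.Set.ofList P.keys := by
  unfold buildPaths
  rw [PySem.Dict.keys_foldl_insert_key (key := Prod.fst)
        (f := fun (d : PySem.Dict (Int × Int) (List (Int × Int))) (x : (Int × Int) × (Int × Int)) => d.getD x.2 [] ++ [x.1])]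
  rfl

theorem contains_buildPaths (P : PySem.Dict (Int × Int) (Int × Int)) (w : Int × Int) :
    (buildPaths P).contains w = P.contains w := by
  rw [PySem.Dict.contains_eq_decide_mem_keys, PySem.Dict.contains_eq_decide_mem_keys,
      keys_buildPaths]
  simp [PySem.Set.mem_ofList]

theorem buildPaths_insert (P : PySem.Dict (Int × Int) (Int × Int)) (w v : Int × Int)
    (h : P.contains w = false) :
    buildPaths (P.insert w v)
      = (buildPaths P).insert w ((buildPaths P).getD v [] ++ [w]) := by
  unfold buildPaths
  rw [PySem.Dict.items_insert]
  rw [h]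
  simp only [Bool.false_eq_true, if_false, List.foldl_append, List.foldl_cons, List.foldl_nil]

theorem fold_sim (g : PySem.Dict (Int × Int) Int) (start v : Int × Int) (p : List (Int × Int))
    (seen : PySem.Set (Int × Int)) (hstart : PySem.Set.contains seen start = true) :
    ∀ (ns : List (Int × Int)) (q : List ((Int × Int) × List (Int × Int)))
      (parent : PySem.Dict (Int × Int) (Int × Int)),
      (buildPaths parent).contains start = false →
      (∀ vp ∈ q, (vp.1 = start ∧ vp.2 = ([] : List (Int × Int)))
          ∨ (buildPaths parent).get? vp.1 = some vp.2) →
      ((v = start ∧ p = []) ∨ (buildPaths parent).get? v = some p) →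
      (ns.foldl (innerB g seen v) (q.map Prod.fst, parent)).1
          = (ns.foldl (innerA g seen v p) (q, buildPaths parent)).1.map Prod.fst ∧
      (ns.foldl (innerA g seen v p) (q, buildPaths parent)).2
          = buildPaths (ns.foldl (innerB g seen v) (q.map Prod.fst, parent)).2 ∧
      (buildPaths (ns.foldl (innerB g seen v) (q.map Prod.fst, parent)).2).contains start = false ∧
      (∀ vp ∈ (ns.foldl (innerA g seen v p) (q, buildPaths parent)).1,
        (vp.1 = start ∧ vp.2 = ([] : List (Int × Int)))
          ∨ (ns.foldl (innerA g seen v p) (q, buildPaths parent)).2.get? vp.1 = some vp.2) := by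
  intro ns
  induction ns with
  | nil =>
      intro q parent h1 h2 h3
      exact ⟨rfl, rfl, h1, h2⟩
  | cons n ns ih =>
      intro q parent h1 h2 h3
      simp only [List.foldl_cons]
      by_cases hg : (g.contains (v.1 + n.1, v.2 + n.2) && !(PySem.Set.contains seen (v.1 + n.1, v.2 + n.2))
          && !((buildPaths parent).contains (v.1 + n.1, v.2 + n.2))
          && !(g.getD (v.1 + n.1, v.2 + n.2) 0 == 1)) = true
      · -- the guard fires in both programs
        set w : Int × Int := (v.1 + n.1, v.2 + n.2) with hw
        have hpc : (buildPaths parent).contains w = false := by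
          rcases Bool.and_eq_true_iff.mp hg with ⟨hg', _⟩
          rcases Bool.and_eq_true_iff.mp hg' with ⟨_, hc⟩
          simpa using hc
        have hparc : parent.contains w = false := by rw [← contains_buildPaths]; exact hpc
        have hA : innerA g seen v p (q, buildPaths parent) n
            = (q ++ [(w, p ++ [w])], (buildPaths parent).insert w (p ++ [w])) := by
          simp only [innerA]
          rw [if_pos (by rw [contains_buildPaths] at hg ⊢; exact hg)]
        have hB : innerB g seen v (q.map Prod.fst, parent) n
            = (q.map Prod.fst ++ [w], parent.insert w v) := by
          simp only [innerB]
          rw [if_pos (by rw [contains_buildPaths] at hg; simpa using hg)]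
        have hwstart : w ≠ start := by
          intro he
          rcases Bool.and_eq_true_iff.mp hg with ⟨hg1, _⟩
          rcases Bool.and_eq_true_iff.mp hg1 with ⟨hg2, _⟩
          rcases Bool.and_eq_true_iff.mp hg2 with ⟨_, hs2⟩
          rw [he] at hs2
          simp only [Bool.not_eq_true'] at hs2
          rw [hstart] at hs2
          cases hs2
        have hgetD : (buildPaths parent).getD v [] = p := by
          rcases h3 with ⟨hv, hp⟩ | hv
          · subst hv; subst hp
            exact PySem.Dict.getD_of_not_contains _ _ h1
          · rw [PySem.Dict.getD_eq_get?_getD, hv]; rfl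
        have hbp : buildPaths (parent.insert w v)
            = (buildPaths parent).insert w (p ++ [w]) := by
          rw [buildPaths_insert parent w v hparc, hgetD]
        have hne_of_get : ∀ z : Int × Int, (buildPaths parent).get? z ≠ none → z ≠ w := by
          intro z hz he
          rw [he] at hz
          rw [PySem.Dict.contains_eq_isSome_get?] at hpc
          exact hz (Option.not_isSome_iff_eq_none.mp (by simp [hpc]))
        rw [hA, hB, ← hbp]
        have := ih (q ++ [(w, p ++ [w])]) (parent.insert w v)
          (by rw [hbp, PySem.Dict.contains_insert]
              simp only [Bool.or_eq_false_iff]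
              exact ⟨by simp [hwstart.symm], h1⟩)
          (by intro vp hvp
              rcases List.mem_append.mp hvp with hvp | hvp
              · rcases h2 vp hvp with hl | hr
                · exact Or.inl hl
                · refine Or.inr ?_
                  rw [hbp, PySem.Dict.get?_insert_of_ne _ _ (hne_of_get vp.1 (by simp [hr]))]
                  exact hr
              · simp only [List.mem_singleton] at hvp
                subst hvp
                refine Or.inr ?_
                rw [hbp]
                simp [PySem.Dict.get?_insert_self]
          )
          (by rcases h3 with hl | hr
              · exact Or.inl hl
              · refine Or.inr ?_
                rw [hbp, PySem.Dict.get?_insert_of_ne _ _ (hne_of_get v (by simp [hr]))]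
                exact hr)
        simpa [List.map_append] using this
      · -- the guard is false in both programs
        have hA : innerA g seen v p (q, buildPaths parent) n = (q, buildPaths parent) := by
          simp only [innerA]
          rw [if_neg (by rw [contains_buildPaths] at hg ⊢; exact hg)]
        have hB : innerB g seen v (q.map Prod.fst, parent) n = (q.map Prod.fst, parent) := by
          simp only [innerB]
          rw [if_neg (by rw [contains_buildPaths] at hg; simpa using hg)]
        rw [hA, hB]
        exact ih q parent h1 h2 h3

theorem loop_sim (g : PySem.Dict (Int × Int) Int) (start : Int × Int) :
    ∀ (f : Nat) (q : List ((Int × Int) × List (Int × Int))) (seen : PySem.Set (Int × Int))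
      (parent : PySem.Dict (Int × Int) (Int × Int)),
      (buildPaths parent).contains start = false →
      (∀ vp ∈ q, (vp.1 = start ∧ vp.2 = ([] : List (Int × Int)))
          ∨ (buildPaths parent).get? vp.1 = some vp.2) →
      (PySem.Set.contains seen start = true ∨ q = [(start, [])]) →
      bfsLoopA g f q seen (buildPaths parent)
        = buildPaths (bfsLoopB g f (q.map Prod.fst) seen parent) := by
  intro f
  induction f with
  | zero => intro q seen parent _ _ _; cases q <;> simp [bfsLoopA, bfsLoopB]
  | succ f ih =>
      intro q seen parent h1 h2 h3
      match q with
      | [] => simp [bfsLoopA, bfsLoopB]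
      | (v, p) :: q =>
        simp only [List.map_cons, bfsLoopA, bfsLoopB]
        by_cases hs : PySem.Set.contains seen v = true
        · rw [if_pos hs, if_pos hs]
          have h3' : PySem.Set.contains seen start = true ∨ q = [(start, [])] := by
            rcases h3 with h | h
            · exact Or.inl h
            · injection h with h h'
              injection h with hv _
              exact Or.inl (hv ▸ hs)
          exact ih q seen parent h1 (fun vp hvp => h2 vp (List.mem_cons_of_mem _ hvp)) h3'
        · rw [if_neg hs, if_neg hs]
          have hstart' : PySem.Set.contains (PySem.Set.add seen v) start = true := by
            have hmem : start ∈ PySem.Set.add seen v := by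
              rcases h3 with h | h
              · exact (PySem.Set.mem_add _ _ _).mpr (Or.inl (by simpa using h))
              · injection h with hh _
                injection hh with hv _
                subst hv
                exact (PySem.Set.mem_add _ _ _).mpr (Or.inr rfl)
            simpa using hmem
          have h3v : (v = start ∧ p = ([] : List (Int × Int)))
              ∨ (buildPaths parent).get? v = some p :=
            h2 (v, p) (List.mem_cons_self ..)
          obtain ⟨hB1, hA2, hc, hq⟩ := fold_sim g start v p (PySem.Set.add seen v) hstart'
            nCoords q parent h1 (fun vp hvp => h2 vp (List.mem_cons_of_mem _ hvp)) h3v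
          rw [hA2, hB1]
          exact ih _ (PySem.Set.add seen v)
            ((nCoords.foldl (innerB g (PySem.Set.add seen v) v) (q.map Prod.fst, parent)).2)
            hc (by rw [hA2] at hq; exact hq) (Or.inl hstart')

-- ===== VERDICT (by name: the statement is the Claim_ definition above) =====
theorem BFS_spec : Claim_equal_BFS := by
  intro grid start _
  unfold Spec_BFS BFS BFS_alt
  have h := loop_sim (gridDict grid) start (grid.length + 1) [(start, [])]
    PySem.Set.empty PySem.Dict.empty (by rfl) (by intro vp hvp; simp at hvp; simp [hvp])
    (Or.inr rfl)
  simpa using congrArg (fun d => d.items.map (fun kv => (kv.1.1, kv.1.2, kv.2))) h
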